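-- pv_equiv track=rewrite | github.com/Saifullahshaikh/-IPU-Intensive-Programming-Unit-01 | 2 Python Programming Examples on Mathematical Expressions/11 Number of digits at ten's and one's place of the integer.py | NumberOfDigits
-- ===== SOURCE A (Python) =====
-- def NumberOfDigits(integer):
--     ones=0
--     ten=0
--     if integer >9 and integer <100:
--         while integer > 9:
--             ones+= integer%10
--             integer=integer//10
--             ten+=integer
--     else:
--         ones= integer
--     return "Ten's: {}\nOne's: {}".format(ten,ones)
-- ===== SOURCE B (Python) =====
-- def NumberOfDigits(integer):
--     if 9 < integer < 100:
--         ten, ones = divmod(integer, 10)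
--     else:
--         ten, ones = 0, integer
--     return "Ten's: {}\nOne's: {}".format(ten, ones)
-- ===== Notes on version B (the rewrite author's own statement) =====
-- stated objective: idiomatic
-- what changed: Replaces the digit-accumulating while loop (which in A's guarded range runs exactly one full extraction pass) with a single closed-form divmod, and drops the mutable accumulators.
import Mathlib
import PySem

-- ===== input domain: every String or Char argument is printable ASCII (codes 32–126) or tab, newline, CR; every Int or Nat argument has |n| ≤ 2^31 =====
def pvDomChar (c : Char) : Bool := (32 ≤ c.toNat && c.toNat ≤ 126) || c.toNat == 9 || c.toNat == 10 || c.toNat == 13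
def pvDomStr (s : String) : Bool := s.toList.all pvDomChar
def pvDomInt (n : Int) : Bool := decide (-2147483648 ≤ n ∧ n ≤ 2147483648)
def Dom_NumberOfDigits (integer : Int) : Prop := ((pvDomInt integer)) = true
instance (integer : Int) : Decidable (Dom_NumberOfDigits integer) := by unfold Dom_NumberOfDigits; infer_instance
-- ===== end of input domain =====

-- B replaces A's digit-accumulating while loop with a single closed-form divmod (idiomatic; same O(1) cost).

-- ===== PORT A =====
-- the 'while integer > 9' loop, carrying (ones, ten) exactly as A does
def pvLoopA (integer ones ten : Int) : Int × Int :=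
  if _h : integer > 9 then
    pvLoopA (PySem.Int.floordiv integer 10)
            (ones + PySem.Int.mod integer 10)
            (ten + PySem.Int.floordiv integer 10)
  else
    (ones, ten)
termination_by integer.toNat
decreasing_by
  rw [PySem.Int.floordiv_eq_ediv_of_pos (by norm_num : (0:Int) < 10)]
  omega

def NumberOfDigits (integer : Int) : String :=
  let ones : Int := 0
  let ten : Int := 0
  if integer > 9 ∧ integer < 100 then
    let r := pvLoopA integer ones ten
    "Ten's: " ++ PySem.Int.toStr r.2 ++ "\nOne's: " ++ PySem.Int.toStr r.1
  else
    "Ten's: " ++ PySem.Int.toStr ten ++ "\nOne's: " ++ PySem.Int.toStr integer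

-- ===== PORT B =====
-- divmod(integer, 10) with the literal nonzero divisor 10 is exactly (floordiv, mod)
def NumberOfDigits_alt (integer : Int) : String :=
  let p : Int × Int :=
    if 9 < integer ∧ integer < 100 then
      (PySem.Int.floordiv integer 10, PySem.Int.mod integer 10)
    else
      (0, integer)
  "Ten's: " ++ PySem.Int.toStr p.1 ++ "\nOne's: " ++ PySem.Int.toStr p.2

-- ===== PRECONDITION & SPEC =====
def Spec_NumberOfDigits (integer : Int) (out : String) : Prop := out = NumberOfDigits_alt integer
instance (integer : Int) (out : String) : Decidable (Spec_NumberOfDigits integer out) := by unfold Spec_NumberOfDigits; infer_instance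

-- ===== CLAIM (what is proved, stated in full; the proofs are below) =====
def Claim_equal_NumberOfDigits : Prop := ∀ (integer : Int), Dom_NumberOfDigits integer → Spec_NumberOfDigits integer (NumberOfDigits integer)

-- ===== LEMMAS AND PROOFS =====

-- In A's guarded range 9 < n < 100 the while loop runs exactly once
theorem pvLoopA_once (n : Int) (h9 : 9 < n) (h100 : n < 100) :
    pvLoopA n 0 0 = (PySem.Int.mod n 10, PySem.Int.floordiv n 10) := by
  rw [pvLoopA, dif_pos h9, pvLoopA, dif_neg]
  · simp
  · rw [PySem.Int.floordiv_eq_ediv_of_pos (by norm_num : (0:Int) < 10)]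
    omega

-- ===== VERDICT (by name: the statement is the Claim_ definition above) =====
theorem NumberOfDigits_spec : Claim_equal_NumberOfDigits := by
  intro n _
  unfold Spec_NumberOfDigits NumberOfDigits NumberOfDigits_alt
  by_cases h : 9 < n ∧ n < 100
  · simp only [if_pos h, pvLoopA_once n h.1 h.2]
  · simp only [if_neg h]
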